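-- pv_equiv track=rewrite | github.com/kevinhenry/game-of-greed | game_of_greed/game_logic.py | validate_keepers
-- ===== SOURCE A (Python) =====
-- from collections import Counter
--
-- def validate_keepers(roll, keepers):
--     """
--     INPUT >> - Tuple - the actual list of dices
--              - Tuple - The users choice
--     OUTPUT >>  Boolean - True/False if user picked from the actual list
--     """
--     count1 = Counter(roll)
--     count2 = Counter(keepers)
--
--     for number, count in count2.items():
--         if number not in count1:
--             return False
--         elif count > count1[number]:
--             return False
--     return True
-- ===== SOURCE B (Python) =====
-- def validate_keepers(roll, keepers):
--     """
--     INPUT >> - Tuple - the actual list of dices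
--              - Tuple - The users choice
--     OUTPUT >>  Boolean - True/False if user picked from the actual list
--     """
--     remaining = list(roll)
--     for k in keepers:
--         if k not in remaining:
--             return False
--         remaining.remove(k)
--     return True
-- ===== Notes on version B (the rewrite author's own statement) =====
-- stated objective: simpler
-- what changed: Replaces the two Counters and per-key count comparison with a single shrinking copy of roll from which each keeper is removed, failing on the first keeper not found.
import Mathlib
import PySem

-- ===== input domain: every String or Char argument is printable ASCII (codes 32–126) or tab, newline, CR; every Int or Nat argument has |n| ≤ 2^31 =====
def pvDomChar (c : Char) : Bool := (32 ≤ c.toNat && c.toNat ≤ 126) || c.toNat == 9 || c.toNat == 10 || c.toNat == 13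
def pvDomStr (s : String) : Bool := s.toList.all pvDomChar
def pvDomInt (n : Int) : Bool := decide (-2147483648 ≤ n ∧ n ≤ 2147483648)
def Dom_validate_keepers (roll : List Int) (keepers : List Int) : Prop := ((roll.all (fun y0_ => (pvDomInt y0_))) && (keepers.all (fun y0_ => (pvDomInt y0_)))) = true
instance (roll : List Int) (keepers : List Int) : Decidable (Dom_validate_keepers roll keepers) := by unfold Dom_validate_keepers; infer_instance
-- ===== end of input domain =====

-- B replaces A's two Counters and per-key count comparison by one shrinking
-- copy of roll from which each keeper is removed (objective: simpler).

-- ===== PORT A =====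
-- for number, count in count2.items(): if number not in count1 / elif count > count1[number]
def validate_keepers_loop (count1 : PySem.Dict Int Int) : List (Int × Int) → Bool
  | [] => true
  | (number, count) :: rest =>
    if ¬ count1.contains number then false
    else if count > count1.getD number 0 then false
    else validate_keepers_loop count1 rest

def validate_keepers (roll : List Int) (keepers : List Int) : Bool :=
  let count1 := PySem.Dict.counter roll
  let count2 := PySem.Dict.counter keepers
  validate_keepers_loop count1 count2.items

-- ===== PORT B =====
-- for k in keepers: if k not in remaining: return False; remaining.remove(k)
def validate_keepers_alt_loop (remaining : List Int) : List Int → Bool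
  | [] => true
  | k :: rest =>
    match PySem.List.remove? remaining k with
    | none => false
    | some r => validate_keepers_alt_loop r rest

def validate_keepers_alt (roll : List Int) (keepers : List Int) : Bool :=
  validate_keepers_alt_loop roll keepers

-- ===== PRECONDITION & SPEC =====
def Spec_validate_keepers (roll : List Int) (keepers : List Int) (out : Bool) : Prop := out = validate_keepers_alt roll keepers
instance (roll : List Int) (keepers : List Int) (out : Bool) : Decidable (Spec_validate_keepers roll keepers out) := by unfold Spec_validate_keepers; infer_instance

-- ===== CLAIM (what is proved, stated in full; the proofs are below) =====
def Claim_equal_validate_keepers : Prop := ∀ (roll : List Int) (keepers : List Int), Dom_validate_keepers roll keepers → Spec_validate_keepers roll keepers (validate_keepers roll keepers)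

-- ===== LEMMAS AND PROOFS =====

-- Removing one copy of k shifts the sub-multiset condition by the head element.
theorem count_erase_shift (k : Int) (rest remaining : List Int) (hk : k ∈ remaining) :
    (∀ x, rest.count x ≤ (remaining.erase k).count x) ↔
      (∀ x, (k :: rest).count x ≤ remaining.count x) := by
  have hc : 0 < remaining.count k := List.count_pos_iff.mpr hk
  constructor
  · intro h x
    have h1 := h x
    by_cases hx : x = k
    · subst hx
      rw [List.count_erase_self] at h1
      rw [List.count_cons_self]
      omega
    · rw [List.count_erase_of_ne hx] at h1
      rw [List.count_cons_of_ne (Ne.symm hx)]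
      exact h1
  · intro h x
    have h1 := h x
    by_cases hx : x = k
    · subst hx
      rw [List.count_cons_self] at h1
      rw [List.count_erase_self]
      omega
    · rw [List.count_cons_of_ne (Ne.symm hx)] at h1
      rw [List.count_erase_of_ne hx]
      exact h1

-- B's loop succeeds iff the keepers form a sub-multiset of the remaining dice.
theorem alt_loop_iff (ks remaining : List Int) :
    validate_keepers_alt_loop remaining ks = true ↔ ∀ x, ks.count x ≤ remaining.count x := by
  induction ks generalizing remaining with
  | nil => simp [validate_keepers_alt_loop]
  | cons k rest ih =>
    by_cases hk : k ∈ remaining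
    · rw [validate_keepers_alt_loop, PySem.List.remove?_eq_some_erase _ _ hk]
      rw [ih]
      exact count_erase_shift k rest remaining hk
    · rw [validate_keepers_alt_loop, (PySem.List.remove?_eq_none_iff _ _).mpr hk]
      exact iff_of_false (by simp) fun h => by
        have h1 := h k
        rw [List.count_cons_self, List.count_eq_zero.mpr hk] at h1
        omega

-- A's loop over an item list succeeds iff every listed pair passes both tests.
theorem a_loop_iff (count1 : PySem.Dict Int Int) (l : List (Int × Int)) :
    validate_keepers_loop count1 l = true ↔
      ∀ p ∈ l, count1.contains p.1 = true ∧ p.2 ≤ count1.getD p.1 0 := by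
  induction l with
  | nil => simp [validate_keepers_loop]
  | cons p rest ih =>
    obtain ⟨n, c⟩ := p
    by_cases h1 : count1.contains n = true
    · by_cases h2 : c > count1.getD n 0
      · rw [validate_keepers_loop, if_neg (not_not_intro h1), if_pos h2]
        exact iff_of_false (by simp) fun h =>
          absurd (h (n, c) List.mem_cons_self).2 (not_le.mpr h2)
      · rw [validate_keepers_loop, if_neg (not_not_intro h1), if_neg h2, ih]
        constructor
        · intro h p hp
          rcases List.mem_cons.mp hp with rfl | hp'
          · exact ⟨h1, not_lt.mp h2⟩
          · exact h p hp'
        · intro h p hp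
          exact h p (List.mem_cons_of_mem _ hp)
    · rw [validate_keepers_loop, if_pos h1]
      exact iff_of_false (by simp) fun h =>
        absurd (h (n, c) List.mem_cons_self).1 h1

theorem validate_keepers_spec : Claim_equal_validate_keepers := by
  intro roll keepers _
  unfold Spec_validate_keepers
  show validate_keepers_loop (PySem.Dict.counter roll) (PySem.Dict.counter keepers).items
      = validate_keepers_alt_loop roll keepers
  rw [Bool.eq_iff_iff, a_loop_iff, alt_loop_iff, PySem.Dict.items_counter]
  simp only [List.forall_mem_map]
  constructor
  · intro h x
    by_cases hx : x ∈ keepers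
    · have h2 := (h x ((PySem.Set.mem_ofList _ _).mpr hx)).2
      rw [PySem.Dict.getD_counter] at h2
      exact_mod_cast h2
    · rw [List.count_eq_zero.mpr hx]
      exact Nat.zero_le _
  · intro h k hk
    have hk' : k ∈ keepers := (PySem.Set.mem_ofList _ _).mp hk
    have hc := h k
    refine ⟨?_, ?_⟩
    · rw [PySem.Dict.contains_counter]
      have : k ∈ roll := List.count_pos_iff.mp
        (Nat.lt_of_lt_of_le (List.count_pos_iff.mpr hk') hc)
      simpa using this
    · rw [PySem.Dict.getD_counter]
      exact_mod_cast hc
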